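-- pv_equiv track=rewrite | github.com/saleor/saleor | saleor/graphql/schema_printer.py | is_printable_as_block_string
-- ===== SOURCE A (Python) =====
-- def is_printable_as_block_string(value: str) -> bool:
--     """Check whether the given string is printable as a block string."""
--     if not isinstance(value, str):
--         value = str(value)  # resolve lazy string proxy object
--
--     if not value:
--         return True  # empty string is printable
--
--     is_empty_line = True
--     has_indent = False
--     has_common_indent = True
--     seen_non_empty_line = False
--
--     for c in value:
--         if c == "\n":
--             if is_empty_line and not seen_non_empty_line:
--                 return False  # has leading new line
--             seen_non_empty_line = True
--             is_empty_line = True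
--             has_indent = False
--         elif c in " \t":
--             has_indent = has_indent or is_empty_line
--         elif c <= "\x0f":
--             return False
--         else:
--             has_common_indent = has_common_indent and has_indent
--             is_empty_line = False
--
--     if is_empty_line:
--         return False  # has trailing empty lines
--
--     if has_common_indent and seen_non_empty_line:
--         return False  # has internal indent
--
--     return True
-- ===== SOURCE B (Python) =====
-- def is_printable_as_block_string(value: str) -> bool:
--     """Check whether the given string is printable as a block string."""
--     if not isinstance(value, str):
--         value = str(value)  # resolve lazy string proxy object
--     if not value:
--         return True
--     if any(c <= "\x0f" and c not in " \t\n" for c in value):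
--         return False  # forbidden control character
--     lines = value.split("\n")
--     starts = [_content_start(line) for line in lines]
--     if len(lines) > 1 and starts[0] is None:
--         return False  # leading new line / blank first line
--     if starts[-1] is None:
--         return False  # trailing empty (or whitespace-only) line
--     if len(lines) > 1 and all(s is None or s > 0 for s in starts):
--         return False  # common internal indent
--     return True
--
--
-- def _content_start(line):
--     """Index of the first non-blank character of the line, or None."""
--     for i, c in enumerate(line):
--         if c not in " \t":
--             return i
--     return None
-- ===== Notes on version B (the rewrite author's own statement) =====
-- stated objective: simpler
-- what changed: B replaces A's single-pass state machine (four mutable flags updated per character) with a line-based decomposition: split on newline, compute each line's first-content index once, and test the four block-string conditions (forbidden control char, blank first line, blank last line, common indent) directly.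
import Mathlib
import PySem

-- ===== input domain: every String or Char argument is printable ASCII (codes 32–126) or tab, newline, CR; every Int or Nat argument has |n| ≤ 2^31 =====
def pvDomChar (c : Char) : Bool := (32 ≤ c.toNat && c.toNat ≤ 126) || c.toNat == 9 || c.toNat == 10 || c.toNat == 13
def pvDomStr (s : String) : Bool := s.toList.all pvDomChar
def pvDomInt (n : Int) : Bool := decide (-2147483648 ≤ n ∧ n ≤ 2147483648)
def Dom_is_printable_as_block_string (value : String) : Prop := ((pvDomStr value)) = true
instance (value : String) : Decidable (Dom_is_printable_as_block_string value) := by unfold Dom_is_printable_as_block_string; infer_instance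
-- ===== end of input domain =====

-- B re-implements the check by splitting into lines and testing the four block-string
-- conditions per line (objective: simpler decomposition, same cost).

-- ===== PORT A =====
-- A's for-loop as structural recursion over the characters; the two checks after the
-- loop form the base case (state: is_empty_line, has_indent, has_common_indent, seen_non_empty_line)
def pvLoopA : List Char → Bool → Bool → Bool → Bool → Bool
  | [], is_empty_line, _has_indent, has_common_indent, seen_non_empty_line =>
      if is_empty_line then false
      else if has_common_indent && seen_non_empty_line then false
      else true
  | c :: rest, is_empty_line, has_indent, has_common_indent, seen_non_empty_line =>
      if c = '\n' then
        if is_empty_line && !seen_non_empty_line then false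
        else pvLoopA rest true false has_common_indent true
      else if c = ' ' ∨ c = '\t' then
        pvLoopA rest is_empty_line (has_indent || is_empty_line) has_common_indent seen_non_empty_line
      else if c ≤ '\x0f' then false
      else pvLoopA rest false has_indent (has_common_indent && has_indent) seen_non_empty_line

def is_printable_as_block_string (value : String) : Bool :=
  if value = "" then true
  else pvLoopA value.toList true false true false

-- ===== PORT B =====
-- hand port of value.split("\n") on the character list (exact for the 1-char separator "\n")
def pvSplitNL : List Char → List (List Char)
  | [] => [[]]
  | c :: rest =>
      if c = '\n' then [] :: pvSplitNL rest
      else match pvSplitNL rest with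
        | [] => [[c]]
        | l :: ls => (c :: l) :: ls

-- _content_start: index of the first char not in " \t", None if the line is blank
def pvContentStart : List Char → Nat → Option Nat
  | [], _ => none
  | c :: rest, i => if !(c = ' ' || c = '\t') then some i else pvContentStart rest (i + 1)

-- c <= "\x0f" and c not in " \t\n"
def pvForbidden (c : Char) : Bool := decide (c ≤ '\x0f') && !(c = ' ' || c = '\t' || c = '\n')

def is_printable_as_block_string_alt (value : String) : Bool :=
  if value = "" then true
  else if value.toList.any pvForbidden then false
  else
    let lines := pvSplitNL value.toList
    let starts := lines.map (fun l => pvContentStart l 0)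
    match starts with
    | [] => true  -- unreachable: split always returns at least one piece
    | s0 :: srest =>
      if decide (lines.length > 1) && decide (s0 = none) then false
      else if decide (srest.getLastD s0 = none) then false
      else if decide (lines.length > 1) &&
              starts.all (fun s => match s with | none => true | some i => decide (0 < i)) then false
      else true

-- ===== PRECONDITION & SPEC =====
def Spec_is_printable_as_block_string (value : String) (out : Bool) : Prop := out = is_printable_as_block_string_alt value
instance (value : String) (out : Bool) : Decidable (Spec_is_printable_as_block_string value out) := by unfold Spec_is_printable_as_block_string; infer_instance

-- ===== CLAIM (what is proved, stated in full; the proofs are below) =====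
def Claim_equal_is_printable_as_block_string : Prop := ∀ (value : String), Dom_is_printable_as_block_string value → Spec_is_printable_as_block_string value (is_printable_as_block_string value)

-- ===== LEMMAS AND PROOFS =====

-- join is the left inverse of pvSplitNL
def pvJoinNL : List (List Char) → List Char
  | [] => []
  | [l] => l
  | l :: ls => l ++ '\n' :: pvJoinNL ls

theorem pvSplitNL_ne_nil (cs : List Char) : pvSplitNL cs ≠ [] := by
  induction cs with
  | nil => simp [pvSplitNL]
  | cons c rest ih =>
    simp only [pvSplitNL]
    split
    · simp
    · cases h : pvSplitNL rest with
      | nil => simp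
      | cons l ls => simp

theorem pvJoin_split (cs : List Char) : pvJoinNL (pvSplitNL cs) = cs := by
  induction cs with
  | nil => simp [pvSplitNL, pvJoinNL]
  | cons c rest ih =>
    simp only [pvSplitNL]
    split
    · rename_i h
      subst h
      cases h2 : pvSplitNL rest with
      | nil => exact absurd h2 (pvSplitNL_ne_nil rest)
      | cons l ls => rw [h2] at ih; simp [pvJoinNL, ih]
    · cases h2 : pvSplitNL rest with
      | nil => exact absurd h2 (pvSplitNL_ne_nil rest)
      | cons l ls =>
        rw [h2] at ih
        cases ls with
        | nil => simpa [pvJoinNL] using congrArg (c :: ·) ih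
        | cons l2 ls2 => simpa [pvJoinNL] using congrArg (c :: ·) ih

theorem pvSplitNL_no_nl (cs : List Char) : ∀ l ∈ pvSplitNL cs, '\n' ∉ l := by
  induction cs with
  | nil => simp [pvSplitNL]
  | cons c rest ih =>
    simp only [pvSplitNL]
    split
    · rename_i h
      intro l hl
      rcases List.mem_cons.1 hl with h1 | h1
      · simp [h1]
      · exact ih l h1
    · rename_i h
      cases h2 : pvSplitNL rest with
      | nil => exact absurd h2 (pvSplitNL_ne_nil rest)
      | cons l ls =>
        intro l' hl'
        rcases List.mem_cons.1 hl' with h1 | h1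
        · subst h1
          intro hm
          rcases List.mem_cons.1 hm with h3 | h3
          · exact h h3.symm
          · exact ih l (by simp [h2]) h3
        · exact ih l' (by simp [h2, h1])

theorem pvContentStart_shift (l : List Char) (i : Nat) :
    pvContentStart l i = (pvContentStart l 0).map (fun j => i + j) := by
  induction l generalizing i with
  | nil => simp [pvContentStart]
  | cons c rest ih =>
    simp only [pvContentStart]
    split
    · simp
    · rw [ih (i + 1), ih 1]
      cases pvContentStart rest 0
      · simp
      · simp; omega

-- line scan after the first content char of the line
theorem pvScan2 (l : List Char) (rest : List Char) (hi hc sn : Bool)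
    (hnl : '\n' ∉ l) (habs : (hc && hi) = hc) :
    pvLoopA (l ++ rest) false hi hc sn =
      if l.any pvForbidden then false else pvLoopA rest false hi hc sn := by
  induction l with
  | nil => simp
  | cons c t ih =>
    have hc0 : c ≠ '\n' := fun h => hnl (by simp [h])
    have hnl' : '\n' ∉ t := fun h => hnl (by simp [h])
    by_cases hsp : c = ' ' ∨ c = '\t'
    · have hf : pvForbidden c = false := by
        rcases hsp with h | h <;> simp [pvForbidden, h]
      simp only [List.cons_append, pvLoopA, if_neg hc0, if_pos hsp, Bool.or_false,
        List.any_cons, hf, Bool.false_or]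
      exact ih hnl'
    · by_cases hx : c ≤ '\x0f'
      · have hf : pvForbidden c = true := by
          simp only [pvForbidden, decide_eq_true hx, Bool.true_and, Bool.not_eq_eq_eq_not,
            Bool.not_true]
          simp only [Bool.or_eq_false_iff, decide_eq_false_iff_not]
          exact ⟨⟨fun h => hsp (Or.inl h), fun h => hsp (Or.inr h)⟩, hc0⟩
        simp [pvLoopA, if_neg hc0, if_neg hsp, if_pos hx, hf]
      · have hf : pvForbidden c = false := by
          simp [pvForbidden, hx]
        simp only [List.cons_append, pvLoopA, if_neg hc0, if_neg hsp, if_neg hx,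
          List.any_cons, hf, Bool.false_or]
        rw [habs]
        exact ih hnl'


-- full scan of one newline-free line entered at a line start (ie = true, arbitrary hi)
theorem pvScanLine (l : List Char) (rest : List Char) (hi hc sn : Bool) (hnl : '\n' ∉ l) :
    pvLoopA (l ++ rest) true hi hc sn =
      if l.any pvForbidden then false
      else match pvContentStart l 0 with
        | none => pvLoopA rest true (hi || !l.isEmpty) hc sn
        | some i => pvLoopA rest false (hi || decide (0 < i)) (hc && (hi || decide (0 < i))) sn := by
  induction l generalizing hi with
  | nil => simp [pvContentStart]
  | cons c t ih =>
    have hc0 : c ≠ '\n' := fun h => hnl (by simp [h])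
    have hnl' : '\n' ∉ t := fun h => hnl (by simp [h])
    by_cases hsp : c = ' ' ∨ c = '\t'
    · have hf : pvForbidden c = false := by
        rcases hsp with h | h <;> simp [pvForbidden, h]
      have hws : (!(c = ' ' || c = '\t')) = false := by
        rcases hsp with h | h <;> simp [h]
      simp only [List.cons_append, pvLoopA, if_neg hc0, if_pos hsp, Bool.or_true,
        List.any_cons, hf, Bool.false_or]
      rw [ih true hnl']
      simp only [pvContentStart, hws, Bool.false_eq_true, if_false, pvContentStart_shift t 1]
      cases h0 : pvContentStart t 0 with
      | none => simp
      | some j => simp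
    · have hws : (!(c = ' ' || c = '\t')) = true := by
        push Not at hsp
        simp [hsp.1, hsp.2]
      have hcs : pvContentStart (c :: t) 0 = some 0 := by
        simp [pvContentStart, hws]
      by_cases hx : c ≤ '\x0f'
      · have hf : pvForbidden c = true := by
          simp only [pvForbidden, decide_eq_true hx, Bool.true_and]
          simp only [Bool.not_eq_eq_eq_not, Bool.not_true, Bool.or_eq_false_iff,
            decide_eq_false_iff_not]
          exact ⟨⟨fun h => hsp (Or.inl h), fun h => hsp (Or.inr h)⟩, hc0⟩
        simp [pvLoopA, if_neg hc0, if_neg hsp, if_pos hx, hf]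
      · have hf : pvForbidden c = false := by
          simp [pvForbidden, hx]
        simp only [List.cons_append, pvLoopA, if_neg hc0, if_neg hsp, if_neg hx,
          List.any_cons, hf, Bool.false_or, hcs]
        rw [pvScan2 t rest hi (hc && hi) sn hnl'
          (by rw [Bool.and_assoc, Bool.and_self])]
        simp



def pvIndent (l : List Char) : Bool :=
  match pvContentStart l 0 with | none => true | some i => decide (0 < i)

theorem pvAny_join (ls : List (List Char)) (f : Char → Bool) (hf : f '\n' = false) :
    (pvJoinNL ls).any f = ls.any (fun l => l.any f) := by
  induction ls with
  | nil => simp [pvJoinNL]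
  | cons l t ih =>
    cases t with
    | nil => simp [pvJoinNL]
    | cons l2 t2 =>
      simp only [pvJoinNL, List.any_append, List.any_cons, hf, Bool.false_or] at *
      rw [ih]

theorem pvStepNL_mid (J : List Char) (hi hcc : Bool) :
    pvLoopA ('\n' :: J) false hi hcc true = pvLoopA J true false hcc true := by
  simp [pvLoopA]

theorem pvStepNL_blank (J : List Char) (hi hcc : Bool) :
    pvLoopA ('\n' :: J) true hi hcc true = pvLoopA J true false hcc true := by
  simp [pvLoopA]

theorem pvStepNL_lead (J : List Char) (hi hcc : Bool) :
    pvLoopA ('\n' :: J) true hi hcc false = false := by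
  simp [pvLoopA]

theorem pvStepNL_cont (J : List Char) (hi hcc : Bool) :
    pvLoopA ('\n' :: J) false hi hcc false = pvLoopA J true false hcc true := by
  simp [pvLoopA]

theorem pvTail (ls : List (List Char)) (hc : Bool) (hne : ls ≠ [])
    (h : ∀ l ∈ ls, '\n' ∉ l) :
    pvLoopA (pvJoinNL ls) true false hc true =
      if ls.any (fun l => l.any pvForbidden) then false
      else if pvContentStart (ls.getLastD []) 0 = none then false
      else if hc && ls.all pvIndent then false
      else true := by
  induction ls generalizing hc with
  | nil => exact absurd rfl hne
  | cons l t ih =>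
    cases t with
    | nil =>
      have hl : '\n' ∉ l := h l (by simp)
      have := pvScanLine l [] false hc true hl
      simp only [List.append_nil] at this
      simp only [pvJoinNL, this]
      cases hcs : pvContentStart l 0 with
      | none => simp [pvLoopA, hcs]
      | some i =>
        have hlast : [l].getLastD ([] : List Char) = l := rfl
        rw [hlast, hcs]
        cases hfb : l.any pvForbidden <;> cases hc <;> cases hi : decide (0 < i) <;>
          simp [pvLoopA, pvIndent, hcs, hfb, hi]
    | cons l2 t2 =>
      have hl : '\n' ∉ l := h l (by simp)
      have hrec : ∀ l' ∈ l2 :: t2, '\n' ∉ l' := fun l' hl' => h l' (by simp [hl'])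
      have hjoin : pvJoinNL (l :: l2 :: t2) = l ++ '\n' :: pvJoinNL (l2 :: t2) := rfl
      rw [hjoin, pvScanLine l _ false hc true hl]
      cases hcs : pvContentStart l 0 with
      | none =>
        simp only [pvStepNL_blank]
        rw [ih hc (by simp) hrec]
        simp only [List.any_cons, List.all_cons, List.getLastD_cons, pvIndent, hcs,
          Bool.true_and]
        cases (l.any pvForbidden) <;> cases ((l2 :: t2).any fun l => l.any pvForbidden) <;>
          simp
      | some i =>
        simp only [pvStepNL_mid]
        rw [ih (hc && (false || decide (0 < i))) (by simp) hrec]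
        simp only [List.any_cons, List.all_cons, List.getLastD_cons, pvIndent, hcs,
          Bool.false_or, Bool.and_assoc]
        cases hfb : l.any pvForbidden <;> simp

theorem pvHead (ls : List (List Char)) (hne : ls ≠ []) (h : ∀ l ∈ ls, '\n' ∉ l) :
    pvLoopA (pvJoinNL ls) true false true false =
      if ls.any (fun l => l.any pvForbidden) then false
      else if decide (1 < ls.length) && decide (pvContentStart (ls.headD []) 0 = none) then false
      else if pvContentStart (ls.getLastD []) 0 = none then false
      else if decide (1 < ls.length) && ls.all pvIndent then false
      else true := by
  cases ls with
  | nil => exact absurd rfl hne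
  | cons l t =>
    cases t with
    | nil =>
      have hl : '\n' ∉ l := h l (by simp)
      have := pvScanLine l [] false true false hl
      simp only [List.append_nil] at this
      simp only [pvJoinNL, this]
      cases hcs : pvContentStart l 0 with
      | none => simp [pvLoopA, hcs]
      | some i => simp [pvLoopA, hcs]
    | cons l2 t2 =>
      have hl : '\n' ∉ l := h l (by simp)
      have hrec : ∀ l' ∈ l2 :: t2, '\n' ∉ l' := fun l' hl' => h l' (by simp [hl'])
      have hjoin : pvJoinNL (l :: l2 :: t2) = l ++ '\n' :: pvJoinNL (l2 :: t2) := rfl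
      rw [hjoin, pvScanLine l _ false true false hl]
      cases hcs : pvContentStart l 0 with
      | none =>
        simp only [pvStepNL_lead]
        cases h1 : l.any pvForbidden <;>
          cases h2 : ((l2 :: t2).any fun l => l.any pvForbidden) <;>
          simp [h1, h2, hcs]
      | some i =>
        simp only [pvStepNL_cont]
        rw [pvTail (l2 :: t2) (true && (false || decide (0 < i))) (by simp) hrec]
        simp only [List.any_cons, List.all_cons, List.getLastD_cons, List.headD_cons, hcs,
          pvIndent, Bool.false_or, Bool.true_and, List.length_cons]
        cases hfb : l.any pvForbidden <;>
          cases hfb2 : ((l2 :: t2).any fun l => l.any pvForbidden) <;>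
          cases hlast : decide (pvContentStart ((l2 :: t2).getLastD []) 0 = none) <;>
          simp_all

theorem pvGetLastD_map {α β : Type} (f : α → β) (t : List α) (d : α) :
    (t.map f).getLastD (f d) = f (t.getLastD d) := by
  induction t generalizing d with
  | nil => rfl
  | cons a t ih => simp only [List.map_cons, List.getLastD_cons, ih]

-- ===== VERDICT (by name: the statement is the Claim_ definition above) =====
theorem is_printable_as_block_string_spec : Claim_equal_is_printable_as_block_string := by
  intro value _
  unfold Spec_is_printable_as_block_string
  unfold is_printable_as_block_string is_printable_as_block_string_alt
  by_cases hv : value = ""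
  · simp [hv]
  · simp only [if_neg hv]
    obtain ⟨l, t, hlt⟩ : ∃ l t, pvSplitNL value.toList = l :: t := by
      cases h : pvSplitNL value.toList with
      | nil => exact absurd h (pvSplitNL_ne_nil _)
      | cons l t => exact ⟨l, t, rfl⟩
    have hany : value.toList.any pvForbidden
        = (pvSplitNL value.toList).any (fun l => l.any pvForbidden) := by
      conv_lhs => rw [← pvJoin_split value.toList]
      exact pvAny_join _ _ (by simp [pvForbidden])
    conv_lhs => rw [← pvJoin_split value.toList]
    rw [pvHead _ (pvSplitNL_ne_nil _) (pvSplitNL_no_nl _), ← hany, hlt]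
    simp only [List.map_cons, List.length_cons, List.headD_cons, List.getLastD_cons,
      pvGetLastD_map]
    have hall : ((pvContentStart l 0 :: List.map (fun l => pvContentStart l 0) t).all
          fun s => match s with | none => true | some i => decide (0 < i))
        = (l :: t).all pvIndent := by
      rw [show (pvContentStart l 0 :: List.map (fun l => pvContentStart l 0) t)
            = (l :: t).map (fun l => pvContentStart l 0) from rfl, List.all_map]
      rfl
    simp only [hall]
    simp [gt_iff_lt]
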